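-- pv_equiv track=rewrite | github.com/nmicic/cunningham-chain-search | analysis/scripts/cc_dashboard_data.py | immunization_depth
-- ===== SOURCE A (Python) =====
-- CRT_PRIMES = [3, 5, 7, 11, 13, 17, 19, 23, 29, 31]
--
-- def immunization_depth(root, primes=CRT_PRIMES):
--     """For a first-kind chain root p, compute how many chain elements
--     survive each small prime q.  Chain element j = 2^j * p + (2^j - 1).
--     Element j ≡ 0 mod q when 2^j * (p+1) ≡ 1 mod q.
--     Returns dict {q: first_j_killed} or {q: None} if immune through 18."""
--     result = {}
--     for q in primes:
--         p_mod = root % q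
--         # chain element j: 2^j * p + 2^j - 1 = 2^j*(p+1) - 1
--         # killed at j if (2^j*(p+1) - 1) % q == 0
--         # i.e. 2^j*(p+1) ≡ 1 (mod q)
--         pp1 = (p_mod + 1) % q
--         if pp1 == 0:
--             # p+1 ≡ 0 mod q → 2^j*(p+1) ≡ 0 mod q → never ≡ 1
--             # but element 0 = p itself: if p%q==q-1 then p+1≡0, element 0 = p ≡ q-1 ≠ 0
--             result[q] = None  # immune to this prime
--             continue
--         killed = None
--         pow2 = 1
--         for j in range(19):  # check elements 0..18
--             val = (pow2 * pp1 - 1) % q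
--             if val == 0:
--                 killed = j
--                 break
--             pow2 = (pow2 * 2) % q
--         result[q] = killed
--     return result
-- ===== SOURCE B (Python) =====
-- CRT_PRIMES = [3, 5, 7, 11, 13, 17, 19, 23, 29, 31]
--
-- def immunization_depth(root, primes=CRT_PRIMES):
--     """Walk the chain itself: element j = 2^j*(root+1) - 1, built incrementally
--     as elem -> 2*elem + 1.  All primes are tested together against each element,
--     keeping a shrinking survivor list; a prime dividing root+1 is immune."""
--     result = {q: None for q in primes}
--     alive = [q for q in primes if (root + 1) % q != 0]
--     elem = root  # chain element 0
--     for j in range(19):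
--         still = []
--         for q in alive:
--             if elem % q == 0:
--                 result[q] = j
--             else:
--                 still.append(q)
--         alive = still
--         elem = 2 * elem + 1  # next chain element
--     return result
-- ===== Notes on version B (the rewrite author's own statement) =====
-- stated objective: alternative
-- what changed: Transposes the loops: instead of a per-prime modular doubling scan with an early break, B walks the chain once (elem -> 2*elem+1, testing actual chain elements) with an inner pass over a shrinking survivor list of primes, recording each prime's first killing index.
import Mathlib
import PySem

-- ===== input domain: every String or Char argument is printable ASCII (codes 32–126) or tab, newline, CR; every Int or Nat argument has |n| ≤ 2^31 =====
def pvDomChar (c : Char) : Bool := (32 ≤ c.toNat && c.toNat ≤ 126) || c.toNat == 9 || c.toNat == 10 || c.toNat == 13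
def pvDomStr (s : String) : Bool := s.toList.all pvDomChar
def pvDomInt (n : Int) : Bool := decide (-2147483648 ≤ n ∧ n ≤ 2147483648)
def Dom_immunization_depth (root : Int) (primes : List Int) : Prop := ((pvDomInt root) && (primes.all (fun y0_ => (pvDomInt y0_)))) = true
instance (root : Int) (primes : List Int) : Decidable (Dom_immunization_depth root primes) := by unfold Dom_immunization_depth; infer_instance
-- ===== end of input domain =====

-- B transposes the loops: it walks the chain itself (elem -> 2*elem + 1), testing every
-- surviving prime against each actual chain element, instead of A's per-prime modular
-- doubling scan with an early break — an alternative of the same cost.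

-- ===== PORT A =====
-- inner 'for j in range(19): … break' of A, as structural recursion over the range list
def pvAScan (q pp1 : Int) (pow2 : Int) : List Int → Option Int
  | [] => none
  | j :: js =>
    if PySem.Int.mod (pow2 * pp1 - 1) q = 0 then some j
    else pvAScan q pp1 (PySem.Int.mod (pow2 * 2) q) js

def immunization_depth (root : Int) (primes : List Int) : List (Int × Option Int) :=
  (primes.foldl (fun (result : PySem.Dict Int (Option Int)) q =>
      let p_mod := PySem.Int.mod root q
      let pp1 := PySem.Int.mod (p_mod + 1) q
      if pp1 = 0 then result.insert q none
      else result.insert q (pvAScan q pp1 1 (PySem.List.pyRange 0 19 1)))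
    PySem.Dict.empty).items

-- ===== PORT B =====
-- body of B's outer 'for j in range(19)' loop: one pass of the survivor list over
-- the current chain element st.2.2, building (updated result, still-alive list)
def pvBRound (j : Int) (st : PySem.Dict Int (Option Int) × List Int × Int) :
    PySem.Dict Int (Option Int) × List Int × Int :=
  let inner := st.2.1.foldl
    (fun (p : PySem.Dict Int (Option Int) × List Int) q =>
      if PySem.Int.mod st.2.2 q = 0 then (p.1.insert q (some j), p.2)
      else (p.1, p.2 ++ [q])) (st.1, ([] : List Int))
  (inner.1, inner.2, 2 * st.2.2 + 1)

def immunization_depth_alt (root : Int) (primes : List Int) : List (Int × Option Int) :=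
  let result0 := primes.foldl (fun (d : PySem.Dict Int (Option Int)) q => d.insert q none) PySem.Dict.empty
  let alive0 := primes.filter (fun q => PySem.Int.mod (root + 1) q != 0)
  ((PySem.List.pyRange 0 19 1).foldl (fun st j => pvBRound j st) (result0, alive0, root)).1.items

-- ===== PRECONDITION & SPEC =====
-- Pre_ excludes exactly the inputs where Python A raises ZeroDivisionError ('root % q' with q = 0).
def Pre_immunization_depth (root : Int) (primes : List Int) : Prop := ∀ q ∈ primes, q ≠ 0
instance (root : Int) (primes : List Int) : Decidable (Pre_immunization_depth root primes) := by unfold Pre_immunization_depth; infer_instance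
def pvWitness_immunization_depth : Int × List Int := (5, [3, 5, 7, 11])

def Spec_immunization_depth (root : Int) (primes : List Int) (out : List (Int × Option Int)) : Prop := out = immunization_depth_alt root primes
instance (root : Int) (primes : List Int) (out : List (Int × Option Int)) : Decidable (Spec_immunization_depth root primes out) := by unfold Spec_immunization_depth; infer_instance

-- ===== CLAIM (what is proved, stated in full; the proofs are below) =====
def Claim_equal_immunization_depth : Prop := ∀ (root : Int) (primes : List Int), Dom_immunization_depth root primes → Pre_immunization_depth root primes → Spec_immunization_depth root primes (immunization_depth root primes)

-- ===== LEMMAS AND PROOFS =====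

-- reference first-kill scan over the ACTUAL chain elements (elem -> 2*elem+1)
def pvScanE (q : Int) : List Int → Int → Option Int
  | [], _ => none
  | j :: js, elem => if PySem.Int.mod elem q = 0 then some j else pvScanE q js (2 * elem + 1)

-- Python '%' leaves a multiple of q
theorem pv_mod_dvd (a q : Int) : q ∣ a - PySem.Int.mod a q := by
  have h := PySem.Int.floordiv_mul_add_mod a q
  exact ⟨PySem.Int.floordiv a q, by linarith⟩

theorem pv_mod_dvd' (a q : Int) : q ∣ PySem.Int.mod a q - a := by
  have h := pv_mod_dvd a q
  have e : PySem.Int.mod a q - a = -(a - PySem.Int.mod a q) := by ring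
  rw [e]; exact dvd_neg.mpr h

theorem pv_mod_eq_mod_iff (a b q : Int) (hq : q ≠ 0) :
    PySem.Int.mod a q = PySem.Int.mod b q ↔ q ∣ a - b := by
  constructor
  · intro h
    have ha := pv_mod_dvd a q
    have hb := pv_mod_dvd b q
    have e : a - b = (a - PySem.Int.mod a q) - (b - PySem.Int.mod b q) := by rw [h]; ring
    rw [e]; exact dvd_sub ha hb
  · intro h
    have hd : q ∣ PySem.Int.mod a q - PySem.Int.mod b q := by
      have e : PySem.Int.mod a q - PySem.Int.mod b q =
          (PySem.Int.mod a q - a) + (b - PySem.Int.mod b q) + (a - b) := by ring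
      rw [e]; exact dvd_add (dvd_add (pv_mod_dvd' a q) (pv_mod_dvd b q)) h
    rcases lt_trichotomy q 0 with hlt | h0 | hgt
    · have b1 := PySem.Int.mod_neg_bounds a hlt
      have b2 := PySem.Int.mod_neg_bounds b hlt
      rcases hd with ⟨k, hk⟩
      have hk0 : k = 0 := by nlinarith
      rw [hk0, mul_zero] at hk
      omega
    · exact absurd h0 hq
    · have b1 := PySem.Int.mod_nonneg a hgt
      have b2 := PySem.Int.mod_lt a hgt
      have b3 := PySem.Int.mod_nonneg b hgt
      have b4 := PySem.Int.mod_lt b hgt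
      rcases hd with ⟨k, hk⟩
      have hk0 : k = 0 := by nlinarith
      rw [hk0, mul_zero] at hk
      omega

-- the two first-kill scans agree whenever elem ≡ pow2*pp1 - 1 (mod q)
theorem pv_scan_eq (q pp1 : Int) :
    ∀ (js : List Int) (pow2 elem : Int), q ∣ elem - (pow2 * pp1 - 1) →
      pvScanE q js elem = pvAScan q pp1 pow2 js := by
  intro js
  induction js with
  | nil => intro pow2 elem _; simp [pvScanE, pvAScan]
  | cons j js ih =>
    intro pow2 elem hdvd
    have hcond : (PySem.Int.mod elem q = 0) ↔ (PySem.Int.mod (pow2 * pp1 - 1) q = 0) := by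
      rw [PySem.Int.mod_eq_zero_iff_dvd, PySem.Int.mod_eq_zero_iff_dvd]
      constructor
      · intro h
        have e : pow2 * pp1 - 1 = elem - (elem - (pow2 * pp1 - 1)) := by ring
        rw [e]; exact dvd_sub h hdvd
      · intro h
        have e : elem = (elem - (pow2 * pp1 - 1)) + (pow2 * pp1 - 1) := by ring
        rw [e]; exact dvd_add hdvd h
    have hnext : q ∣ (2 * elem + 1) - (PySem.Int.mod (pow2 * 2) q * pp1 - 1) := by
      have h2 : q ∣ (pow2 * 2 - PySem.Int.mod (pow2 * 2) q) * pp1 :=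
        (pv_mod_dvd (pow2 * 2) q).mul_right pp1
      have e : (2 * elem + 1) - (PySem.Int.mod (pow2 * 2) q * pp1 - 1) =
          2 * (elem - (pow2 * pp1 - 1)) + (pow2 * 2 - PySem.Int.mod (pow2 * 2) q) * pp1 := by ring
      rw [e]; exact dvd_add (hdvd.mul_left 2) h2
    by_cases hk : PySem.Int.mod elem q = 0
    · rw [pvScanE, pvAScan, if_pos hk, if_pos (hcond.mp hk)]
    · rw [pvScanE, pvAScan, if_neg hk, if_neg (fun h => hk (hcond.mpr h)),
        ih (PySem.Int.mod (pow2 * 2) q) (2 * elem + 1) hnext]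

-- getD over a pure insert loop
theorem pv_getD_foldl_insert (v : Int → Option Int) :
    ∀ (l : List Int) (d : PySem.Dict Int (Option Int)) (x : Int),
      (l.foldl (fun d q => d.insert q (v q)) d).getD x none =
        if x ∈ l then v x else d.getD x none := by
  intro l
  induction l with
  | nil => intro d x; simp
  | cons q l ih =>
    intro d x
    rw [List.foldl_cons, ih]
    by_cases hm : x ∈ l
    · simp [hm]
    · by_cases hx : x = q
      · subst hx; simp [hm, PySem.Dict.getD_insert_self]
      · simp [hm, hx, PySem.Dict.getD_insert]

-- ---- inner pass (one chain element over the survivor list) ----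

theorem pv_inner_getD (elem j : Int) :
    ∀ (alive : List Int) (d : PySem.Dict Int (Option Int)) (still : List Int) (x : Int),
      ((alive.foldl (fun (p : PySem.Dict Int (Option Int) × List Int) q =>
          if PySem.Int.mod elem q = 0 then (p.1.insert q (some j), p.2)
          else (p.1, p.2 ++ [q])) (d, still)).1).getD x none =
        if x ∈ alive ∧ PySem.Int.mod elem x = 0 then some j else d.getD x none := by
  intro alive
  induction alive with
  | nil => intro d still x; simp
  | cons q alive ih =>
    intro d still x
    rw [List.foldl_cons]
    by_cases hk : PySem.Int.mod elem q = 0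
    · rw [if_pos hk, ih]
      by_cases hm : x ∈ alive ∧ PySem.Int.mod elem x = 0
      · rw [if_pos hm, if_pos ⟨List.mem_cons_of_mem _ hm.1, hm.2⟩]
      · rw [if_neg hm]
        by_cases hx : x = q
        · subst hx
          rw [PySem.Dict.getD_insert_self, if_pos ⟨List.mem_cons_self .., hk⟩]
        · have hnc : ¬ (x ∈ q :: alive ∧ PySem.Int.mod elem x = 0) := by
            rintro ⟨hmem, hz⟩
            rcases List.mem_cons.mp hmem with h | h
            · exact hx h
            · exact hm ⟨h, hz⟩
          rw [PySem.Dict.getD_insert_of_ne d (some j) none hx, if_neg hnc]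
    · rw [if_neg hk, ih]
      by_cases hm : x ∈ alive ∧ PySem.Int.mod elem x = 0
      · rw [if_pos hm, if_pos ⟨List.mem_cons_of_mem _ hm.1, hm.2⟩]
      · have hnc : ¬ (x ∈ q :: alive ∧ PySem.Int.mod elem x = 0) := by
          rintro ⟨hmem, hz⟩
          rcases List.mem_cons.mp hmem with h | h
          · exact hk (h ▸ hz)
          · exact hm ⟨h, hz⟩
        rw [if_neg hm, if_neg hnc]

theorem pv_inner_still (elem j : Int) :
    ∀ (alive : List Int) (d : PySem.Dict Int (Option Int)) (still : List Int),
      ((alive.foldl (fun (p : PySem.Dict Int (Option Int) × List Int) q =>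
          if PySem.Int.mod elem q = 0 then (p.1.insert q (some j), p.2)
          else (p.1, p.2 ++ [q])) (d, still)).2) =
        still ++ alive.filter (fun q => PySem.Int.mod elem q != 0) := by
  intro alive
  induction alive with
  | nil => intro d still; simp
  | cons q alive ih =>
    intro d still
    rw [List.foldl_cons]
    by_cases hk : PySem.Int.mod elem q = 0
    · rw [if_pos hk, ih]
      simp [hk]
    · rw [if_neg hk, ih]
      simp [hk]

theorem pv_inner_keys (elem j : Int) :
    ∀ (alive : List Int) (d : PySem.Dict Int (Option Int)) (still : List Int),
      (∀ q ∈ alive, d.contains q = true) →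
      ((alive.foldl (fun (p : PySem.Dict Int (Option Int) × List Int) q =>
          if PySem.Int.mod elem q = 0 then (p.1.insert q (some j), p.2)
          else (p.1, p.2 ++ [q])) (d, still)).1).keys = d.keys := by
  intro alive
  induction alive with
  | nil => intro d still _; simp
  | cons q alive ih =>
    intro d still hc
    rw [List.foldl_cons]
    by_cases hk : PySem.Int.mod elem q = 0
    · rw [if_pos hk]
      have hkeys : (d.insert q (some j)).keys = d.keys :=
        PySem.Dict.keys_insert_of_contains d (some j) (hc q (List.mem_cons_self ..))
      rw [ih (d.insert q (some j)) still (fun r hr => by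
        rw [PySem.Dict.contains_iff_mem_keys, hkeys, ← PySem.Dict.contains_iff_mem_keys]
        exact hc r (List.mem_cons_of_mem _ hr)), hkeys]
    · rw [if_neg hk]
      exact ih d (still ++ [q]) (fun r hr => hc r (List.mem_cons_of_mem _ hr))

-- ---- outer loop over the 19 chain elements ----

theorem pv_run_keys :
    ∀ (js : List Int) (d : PySem.Dict Int (Option Int)) (alive : List Int) (elem : Int),
      (∀ q ∈ alive, d.contains q = true) →
      ((js.foldl (fun st j => pvBRound j st) (d, alive, elem)).1).keys = d.keys := by
  intro js
  induction js with
  | nil => intro d alive elem _; simp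
  | cons j js ih =>
    intro d alive elem hc
    rw [List.foldl_cons]
    show ((js.foldl (fun st j => pvBRound j st) (pvBRound j (d, alive, elem))).1).keys = d.keys
    rw [show pvBRound j (d, alive, elem) =
      ((alive.foldl (fun (p : PySem.Dict Int (Option Int) × List Int) q =>
          if PySem.Int.mod elem q = 0 then (p.1.insert q (some j), p.2)
          else (p.1, p.2 ++ [q])) (d, ([] : List Int))).1,
        [] ++ alive.filter (fun q => PySem.Int.mod elem q != 0), 2 * elem + 1) from by
          simp [pvBRound, pv_inner_still]]
    rw [ih _ _ _ (fun r hr => by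
      have hr' : r ∈ alive := by
        simp only [List.nil_append, List.mem_filter] at hr
        exact hr.1
      rw [PySem.Dict.contains_iff_mem_keys, pv_inner_keys elem j alive d [] hc,
        ← PySem.Dict.contains_iff_mem_keys]
      exact hc r hr')]
    exact pv_inner_keys elem j alive d [] hc

theorem pv_run_getD :
    ∀ (js : List Int) (d : PySem.Dict Int (Option Int)) (alive : List Int) (elem x : Int),
      (∀ q ∈ alive, d.contains q = true) →
      ((js.foldl (fun st j => pvBRound j st) (d, alive, elem)).1).getD x none =
        if x ∈ alive then (pvScanE x js elem).or (d.getD x none) else d.getD x none := by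
  intro js
  induction js with
  | nil =>
    intro d alive elem x _
    by_cases hm : x ∈ alive <;> simp [hm, pvScanE]
  | cons j js ih =>
    intro d alive elem x hc
    rw [List.foldl_cons]
    show ((js.foldl (fun st j => pvBRound j st) (pvBRound j (d, alive, elem))).1).getD x none = _
    rw [show pvBRound j (d, alive, elem) =
      ((alive.foldl (fun (p : PySem.Dict Int (Option Int) × List Int) q =>
          if PySem.Int.mod elem q = 0 then (p.1.insert q (some j), p.2)
          else (p.1, p.2 ++ [q])) (d, ([] : List Int))).1,
        [] ++ alive.filter (fun q => PySem.Int.mod elem q != 0), 2 * elem + 1) from by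
          simp [pvBRound, pv_inner_still]]
    rw [ih _ _ _ _ (fun r hr => by
      have hr' : r ∈ alive := by
        simp only [List.nil_append, List.mem_filter] at hr
        exact hr.1
      rw [PySem.Dict.contains_iff_mem_keys, pv_inner_keys elem j alive d [] hc,
        ← PySem.Dict.contains_iff_mem_keys]
      exact hc r hr')]
    rw [pv_inner_getD]
    by_cases hm : x ∈ alive
    · by_cases hk : PySem.Int.mod elem x = 0
      · have hnm : x ∉ alive.filter (fun q => PySem.Int.mod elem q != 0) := by
          intro h; exact absurd hk (by simpa using (List.mem_filter.mp h).2)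
        simp [hm, hk, hnm, pvScanE, Option.or]
      · have hmm : x ∈ alive.filter (fun q => PySem.Int.mod elem q != 0) :=
          List.mem_filter.mpr ⟨hm, by simpa using hk⟩
        simp [hm, hk, hmm, pvScanE]
    · have hnm : x ∉ alive.filter (fun q => PySem.Int.mod elem q != 0) := by
        intro h; exact hm (List.mem_filter.mp h).1
      simp [hm, hnm]

-- A's per-prime step, normalized to a single insert of B's value (q ≠ 0)
theorem pv_stepA_eq (root q : Int) (hq : q ≠ 0) (result : PySem.Dict Int (Option Int)) :
    (let p_mod := PySem.Int.mod root q
     let pp1 := PySem.Int.mod (p_mod + 1) q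
     if pp1 = 0 then result.insert q none
     else result.insert q (pvAScan q pp1 1 (PySem.List.pyRange 0 19 1))) =
    result.insert q (if PySem.Int.mod (root + 1) q = 0 then none
      else pvScanE q (PySem.List.pyRange 0 19 1) root) := by
  have hpp1 : PySem.Int.mod (PySem.Int.mod root q + 1) q = PySem.Int.mod (root + 1) q := by
    rw [pv_mod_eq_mod_iff _ _ _ hq]
    have h := pv_mod_dvd' root q
    have e : PySem.Int.mod root q + 1 - (root + 1) = PySem.Int.mod root q - root := by ring
    rw [e]; exact h
  show (if PySem.Int.mod (PySem.Int.mod root q + 1) q = 0 then result.insert q none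
        else result.insert q (pvAScan q (PySem.Int.mod (PySem.Int.mod root q + 1) q) 1
          (PySem.List.pyRange 0 19 1))) = _
  rw [hpp1]
  by_cases h0 : PySem.Int.mod (root + 1) q = 0
  · rw [if_pos h0, if_pos h0]
  · rw [if_neg h0, if_neg h0]
    congr 1
    exact Eq.symm <| pv_scan_eq q (PySem.Int.mod (root + 1) q) (PySem.List.pyRange 0 19 1) 1 root
      (by have := pv_mod_dvd (root + 1) q
          have e : root - (1 * PySem.Int.mod (root + 1) q - 1) =
            (root + 1) - PySem.Int.mod (root + 1) q := by ring
          rw [e]; exact this)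

-- ===== VERDICT (by name: the statement is the Claim_ definition above) =====
theorem immunization_depth_spec : Claim_equal_immunization_depth := by
  intro root primes _hdom hpre
  unfold Spec_immunization_depth
  simp only [immunization_depth, immunization_depth_alt]
  rw [PySem.List.foldl_congr_mem primes _
    (fun (result : PySem.Dict Int (Option Int)) q => result.insert q
      (if PySem.Int.mod (root + 1) q = 0 then none
       else pvScanE q (PySem.List.pyRange 0 19 1) root))
    PySem.Dict.empty
    (fun result q hq => pv_stepA_eq root q (hpre q hq) result)]
  have hAkeys : (primes.foldl (fun (d : PySem.Dict Int (Option Int)) q => d.insert q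
      (if PySem.Int.mod (root + 1) q = 0 then none
       else pvScanE q (PySem.List.pyRange 0 19 1) root)) PySem.Dict.empty).keys =
      PySem.Set.update ([] : List Int) primes := by
    rw [PySem.Dict.keys_foldl_insert primes
      (fun (_ : PySem.Dict Int (Option Int)) q =>
        (if PySem.Int.mod (root + 1) q = 0 then none
         else pvScanE q (PySem.List.pyRange 0 19 1) root))]
    rfl
  have hAnodup : (primes.foldl (fun (d : PySem.Dict Int (Option Int)) q => d.insert q
      (if PySem.Int.mod (root + 1) q = 0 then none
       else pvScanE q (PySem.List.pyRange 0 19 1) root)) PySem.Dict.empty).keys.Nodup :=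
    PySem.Dict.nodup_keys_foldl_insert primes _ PySem.Dict.empty PySem.Dict.nodup_keys_empty
  have h0keys : (primes.foldl (fun (d : PySem.Dict Int (Option Int)) q => d.insert q none)
      PySem.Dict.empty).keys = PySem.Set.update ([] : List Int) primes := by
    rw [PySem.Dict.keys_foldl_insert primes
      (fun (_ : PySem.Dict Int (Option Int)) (_ : Int) => (none : Option Int))]
    rfl
  have h0nodup : (primes.foldl (fun (d : PySem.Dict Int (Option Int)) q => d.insert q none)
      PySem.Dict.empty).keys.Nodup :=
    PySem.Dict.nodup_keys_foldl_insert primes _ PySem.Dict.empty PySem.Dict.nodup_keys_empty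
  have hc0 : ∀ q ∈ primes.filter (fun q => PySem.Int.mod (root + 1) q != 0),
      (primes.foldl (fun (d : PySem.Dict Int (Option Int)) q => d.insert q none)
        PySem.Dict.empty).contains q = true := by
    intro q hq
    rw [PySem.Dict.contains_iff_mem_keys, h0keys, PySem.Set.mem_update]
    exact Or.inr (List.mem_filter.mp hq).1
  have hBkeys : (((PySem.List.pyRange 0 19 1).foldl (fun st j => pvBRound j st)
      (primes.foldl (fun (d : PySem.Dict Int (Option Int)) q => d.insert q none) PySem.Dict.empty,
       primes.filter (fun q => PySem.Int.mod (root + 1) q != 0), root)).1).keys =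
      PySem.Set.update ([] : List Int) primes := by
    rw [pv_run_keys _ _ _ _ hc0]; exact h0keys
  have hBnodup : (((PySem.List.pyRange 0 19 1).foldl (fun st j => pvBRound j st)
      (primes.foldl (fun (d : PySem.Dict Int (Option Int)) q => d.insert q none) PySem.Dict.empty,
       primes.filter (fun q => PySem.Int.mod (root + 1) q != 0), root)).1).keys.Nodup := by
    rw [pv_run_keys _ _ _ _ hc0]; exact h0nodup
  rw [PySem.Dict.items_eq_map_keys _ hAnodup none, PySem.Dict.items_eq_map_keys _ hBnodup none,
    hAkeys, hBkeys]
  apply List.map_congr_left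
  intro x hx
  have hxp : x ∈ primes := by
    rcases (PySem.Set.mem_update ([] : List Int) primes x).mp hx with h | h
    · exact absurd h (List.not_mem_nil)
    · exact h
  have hA : (primes.foldl (fun (d : PySem.Dict Int (Option Int)) q => d.insert q
      (if PySem.Int.mod (root + 1) q = 0 then none
       else pvScanE q (PySem.List.pyRange 0 19 1) root)) PySem.Dict.empty).getD x none =
      (if PySem.Int.mod (root + 1) x = 0 then none
       else pvScanE x (PySem.List.pyRange 0 19 1) root) := by
    rw [pv_getD_foldl_insert]; simp [hxp]
  have h0 : (primes.foldl (fun (d : PySem.Dict Int (Option Int)) q => d.insert q none)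
      PySem.Dict.empty).getD x none = none := by
    rw [pv_getD_foldl_insert (fun _ => none)]; simp
  have hB : (((PySem.List.pyRange 0 19 1).foldl (fun st j => pvBRound j st)
      (primes.foldl (fun (d : PySem.Dict Int (Option Int)) q => d.insert q none) PySem.Dict.empty,
       primes.filter (fun q => PySem.Int.mod (root + 1) q != 0), root)).1).getD x none =
      (if PySem.Int.mod (root + 1) x = 0 then none
       else pvScanE x (PySem.List.pyRange 0 19 1) root) := by
    rw [pv_run_getD _ _ _ _ _ hc0, h0]
    by_cases hz : PySem.Int.mod (root + 1) x = 0
    · have : x ∉ primes.filter (fun q => PySem.Int.mod (root + 1) q != 0) := by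
        intro h
        exact absurd hz (by simpa using (List.mem_filter.mp h).2)
      simp [this, hz]
    · have : x ∈ primes.filter (fun q => PySem.Int.mod (root + 1) q != 0) :=
        List.mem_filter.mpr ⟨hxp, by simpa using hz⟩
      simp [this, hz, Option.or_none]
  rw [hA, hB]
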